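-- pv_equiv track=rewrite | github.com/MISP/misp-workbench | api/app/repositories/notifications.py | _notification_email_subject
-- ===== SOURCE A (Python) =====
-- def _notification_email_subject(notification_type: str) -> str:
--     prefixes = {
--         "hunt.": "Hunt Results",
--         "attribute.sighting.": "New Sighting",
--         "attribute.correlation.": "New Correlation",
--         "attribute.": "Attribute Update",
--         "event.attribute.": "Attribute Update",
--         "event.object.": "Object Update",
--         "object.": "Object Update",
--         "organisation.event.": "Event Update from Followed Organisation",
--         "event.": "Event Update",
--     }
--     for prefix, label in prefixes.items():
--         if notification_type.startswith(prefix):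
--             return f"[misp-workbench] {label}"
--     return "[misp-workbench] New Notification"
-- ===== SOURCE B (Python) =====
-- def _notification_email_subject(notification_type: str) -> str:
--     prefixes = {
--         "hunt.": "Hunt Results",
--         "attribute.sighting.": "New Sighting",
--         "attribute.correlation.": "New Correlation",
--         "attribute.": "Attribute Update",
--         "event.attribute.": "Attribute Update",
--         "event.object.": "Object Update",
--         "object.": "Object Update",
--         "organisation.event.": "Event Update from Followed Organisation",
--         "event.": "Event Update",
--     }
--     # longest-matching-prefix scan instead of order-sensitive first match
--     best_len = -1
--     best_label = "New Notification"
--     for prefix, label in prefixes.items():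
--         if notification_type.startswith(prefix) and len(prefix) > best_len:
--             best_len = len(prefix)
--             best_label = label
--     return f"[misp-workbench] {best_label}"
-- ===== Notes on version B (the rewrite author's own statement) =====
-- stated objective: alternative
-- what changed: Replaces the order-sensitive first-match early return with a full scan that keeps the longest matching prefix and builds the subject once at the end; equivalent because any two prefixes matching the same string are nested and the dict lists the longer one first.
import Mathlib
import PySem

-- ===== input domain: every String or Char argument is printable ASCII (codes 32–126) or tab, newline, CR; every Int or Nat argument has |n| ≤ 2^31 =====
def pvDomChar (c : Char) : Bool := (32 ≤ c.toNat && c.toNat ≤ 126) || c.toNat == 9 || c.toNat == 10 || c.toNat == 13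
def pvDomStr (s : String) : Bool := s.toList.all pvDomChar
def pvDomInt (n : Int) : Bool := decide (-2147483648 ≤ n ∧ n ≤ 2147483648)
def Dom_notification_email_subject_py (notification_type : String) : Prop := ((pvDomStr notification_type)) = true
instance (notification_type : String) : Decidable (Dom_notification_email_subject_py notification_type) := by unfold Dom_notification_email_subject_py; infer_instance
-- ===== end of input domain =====

-- B replaces A's order-sensitive first-match early return with a longest-matching-prefix scan (alternative decomposition, same cost).

-- the prefix → label table shared by both ports (the dict literal of the Python, in insertion order)
def pvPrefixes : List (String × String) :=
  [("hunt.", "Hunt Results"),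
   ("attribute.sighting.", "New Sighting"),
   ("attribute.correlation.", "New Correlation"),
   ("attribute.", "Attribute Update"),
   ("event.attribute.", "Attribute Update"),
   ("event.object.", "Object Update"),
   ("object.", "Object Update"),
   ("organisation.event.", "Event Update from Followed Organisation"),
   ("event.", "Event Update")]

-- ===== PORT A =====
-- A's loop: return the label of the FIRST prefix that matches
def pvFirstMatch (s : String) : List (String × String) → Option String
  | [] => none
  | (p, l) :: rest => if PySem.Str.startswith s p then some l else pvFirstMatch s rest

def notification_email_subject_py (notification_type : String) : String :=
  match pvFirstMatch notification_type pvPrefixes with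
  | some l => "[misp-workbench] " ++ l
  | none => "[misp-workbench] New Notification"

-- ===== PORT B =====
-- B's loop: scan all pairs keeping the longest matching prefix (best_len starts at -1)
def notification_email_subject_py_alt (notification_type : String) : String :=
  let best := pvPrefixes.foldl
    (fun (acc : Int × String) (pl : String × String) =>
      if PySem.Str.startswith notification_type pl.1 && decide (acc.1 < (PySem.Str.len pl.1 : Int)) then
        ((PySem.Str.len pl.1 : Int), pl.2)
      else acc)
    (-1, "New Notification")
  "[misp-workbench] " ++ best.2

-- ===== PRECONDITION & SPEC =====
def Spec_notification_email_subject_py (notification_type : String) (out : String) : Prop := out = notification_email_subject_py_alt notification_type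
instance (notification_type : String) (out : String) : Decidable (Spec_notification_email_subject_py notification_type out) := by unfold Spec_notification_email_subject_py; infer_instance

-- ===== CLAIM (what is proved, stated in full; the proofs are below) =====
def Claim_equal_notification_email_subject_py : Prop := ∀ (notification_type : String), Dom_notification_email_subject_py notification_type → Spec_notification_email_subject_py notification_type (notification_email_subject_py notification_type)

-- ===== LEMMAS AND PROOFS =====

-- if p is a prefix of q and s starts with q, then s starts with p
theorem sw_of_sw (s p q : String) (hpq : p.toList <+: q.toList)
    (h : PySem.Str.startswith s q = true) : PySem.Str.startswith s p = true := by
  simp only [PySem.Str.startswith_eq, PySem.Chars.startswith_iff] at h ⊢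
  exact hpq.trans h

-- s cannot start with two incomparable prefixes
theorem sw_not (s p q : String) (h : PySem.Str.startswith s p = true)
    (h1 : ¬ p.toList <+: q.toList) (h2 : ¬ q.toList <+: p.toList) :
    PySem.Str.startswith s q = false := by
  rw [Bool.eq_false_iff]
  intro hq
  simp only [PySem.Str.startswith_eq, PySem.Chars.startswith_iff] at h hq
  rcases List.prefix_or_prefix_of_prefix hq h with hc | hc
  · exact h2 hc
  · exact h1 hc

-- the matching prefixes of any string form a chain, and the table lists longer prefixes
-- first among nested ones, so first match = longest match: case analysis on the maximal match
theorem main_eq (s : String) :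
    notification_email_subject_py s = notification_email_subject_py_alt s := by
  have L0 : ("hunt." : String).length = 5 := rfl
  have L1 : ("attribute.sighting." : String).length = 19 := rfl
  have L2 : ("attribute.correlation." : String).length = 22 := rfl
  have L3 : ("attribute." : String).length = 10 := rfl
  have L4 : ("event.attribute." : String).length = 16 := rfl
  have L5 : ("event.object." : String).length = 13 := rfl
  have L6 : ("object." : String).length = 7 := rfl
  have L7 : ("organisation.event." : String).length = 19 := rfl
  have L8 : ("event." : String).length = 6 := rfl
  by_cases h0 : PySem.Str.startswith s "hunt." = true
  case pos =>
    have e1 : PySem.Str.startswith s "attribute.sighting." = false := sw_not s "hunt." "attribute.sighting." h0 (by decide) (by decide)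
    have e2 : PySem.Str.startswith s "attribute.correlation." = false := sw_not s "hunt." "attribute.correlation." h0 (by decide) (by decide)
    have e3 : PySem.Str.startswith s "attribute." = false := sw_not s "hunt." "attribute." h0 (by decide) (by decide)
    have e4 : PySem.Str.startswith s "event.attribute." = false := sw_not s "hunt." "event.attribute." h0 (by decide) (by decide)
    have e5 : PySem.Str.startswith s "event.object." = false := sw_not s "hunt." "event.object." h0 (by decide) (by decide)
    have e6 : PySem.Str.startswith s "object." = false := sw_not s "hunt." "object." h0 (by decide) (by decide)
    have e7 : PySem.Str.startswith s "organisation.event." = false := sw_not s "hunt." "organisation.event." h0 (by decide) (by decide)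
    have e8 : PySem.Str.startswith s "event." = false := sw_not s "hunt." "event." h0 (by decide) (by decide)
    simp [PySem.Str.startswith_eq] at h0 e1 e2 e3 e4 e5 e6 e7 e8
    simp [notification_email_subject_py, notification_email_subject_py_alt, pvFirstMatch, pvPrefixes, h0, e1, e2, e3, e4, e5, e6, e7, e8, L0, L1, L2, L3, L4, L5, L6, L7, L8]
  by_cases h1 : PySem.Str.startswith s "attribute.sighting." = true
  case pos =>
    have e2 : PySem.Str.startswith s "attribute.correlation." = false := sw_not s "attribute.sighting." "attribute.correlation." h1 (by decide) (by decide)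
    have e3 : PySem.Str.startswith s "attribute." = true := sw_of_sw s "attribute." "attribute.sighting." (by decide) h1
    have e4 : PySem.Str.startswith s "event.attribute." = false := sw_not s "attribute.sighting." "event.attribute." h1 (by decide) (by decide)
    have e5 : PySem.Str.startswith s "event.object." = false := sw_not s "attribute.sighting." "event.object." h1 (by decide) (by decide)
    have e6 : PySem.Str.startswith s "object." = false := sw_not s "attribute.sighting." "object." h1 (by decide) (by decide)
    have e7 : PySem.Str.startswith s "organisation.event." = false := sw_not s "attribute.sighting." "organisation.event." h1 (by decide) (by decide)
    have e8 : PySem.Str.startswith s "event." = false := sw_not s "attribute.sighting." "event." h1 (by decide) (by decide)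
    simp [PySem.Str.startswith_eq] at h0 h1 e2 e3 e4 e5 e6 e7 e8
    simp [notification_email_subject_py, notification_email_subject_py_alt, pvFirstMatch, pvPrefixes, h0, h1, e2, e3, e4, e5, e6, e7, e8, L0, L1, L2, L3, L4, L5, L6, L7, L8]
  by_cases h2 : PySem.Str.startswith s "attribute.correlation." = true
  case pos =>
    have e3 : PySem.Str.startswith s "attribute." = true := sw_of_sw s "attribute." "attribute.correlation." (by decide) h2
    have e4 : PySem.Str.startswith s "event.attribute." = false := sw_not s "attribute.correlation." "event.attribute." h2 (by decide) (by decide)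
    have e5 : PySem.Str.startswith s "event.object." = false := sw_not s "attribute.correlation." "event.object." h2 (by decide) (by decide)
    have e6 : PySem.Str.startswith s "object." = false := sw_not s "attribute.correlation." "object." h2 (by decide) (by decide)
    have e7 : PySem.Str.startswith s "organisation.event." = false := sw_not s "attribute.correlation." "organisation.event." h2 (by decide) (by decide)
    have e8 : PySem.Str.startswith s "event." = false := sw_not s "attribute.correlation." "event." h2 (by decide) (by decide)
    simp [PySem.Str.startswith_eq] at h0 h1 h2 e3 e4 e5 e6 e7 e8
    simp [notification_email_subject_py, notification_email_subject_py_alt, pvFirstMatch, pvPrefixes, h0, h1, h2, e3, e4, e5, e6, e7, e8, L0, L1, L2, L3, L4, L5, L6, L7, L8]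
  by_cases h3 : PySem.Str.startswith s "attribute." = true
  case pos =>
    have e4 : PySem.Str.startswith s "event.attribute." = false := sw_not s "attribute." "event.attribute." h3 (by decide) (by decide)
    have e5 : PySem.Str.startswith s "event.object." = false := sw_not s "attribute." "event.object." h3 (by decide) (by decide)
    have e6 : PySem.Str.startswith s "object." = false := sw_not s "attribute." "object." h3 (by decide) (by decide)
    have e7 : PySem.Str.startswith s "organisation.event." = false := sw_not s "attribute." "organisation.event." h3 (by decide) (by decide)
    have e8 : PySem.Str.startswith s "event." = false := sw_not s "attribute." "event." h3 (by decide) (by decide)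
    simp [PySem.Str.startswith_eq] at h0 h1 h2 h3 e4 e5 e6 e7 e8
    simp [notification_email_subject_py, notification_email_subject_py_alt, pvFirstMatch, pvPrefixes, h0, h1, h2, h3, e4, e5, e6, e7, e8, L0, L1, L2, L3, L4, L5, L6, L7, L8]
  by_cases h4 : PySem.Str.startswith s "event.attribute." = true
  case pos =>
    have e5 : PySem.Str.startswith s "event.object." = false := sw_not s "event.attribute." "event.object." h4 (by decide) (by decide)
    have e6 : PySem.Str.startswith s "object." = false := sw_not s "event.attribute." "object." h4 (by decide) (by decide)
    have e7 : PySem.Str.startswith s "organisation.event." = false := sw_not s "event.attribute." "organisation.event." h4 (by decide) (by decide)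
    have e8 : PySem.Str.startswith s "event." = true := sw_of_sw s "event." "event.attribute." (by decide) h4
    simp [PySem.Str.startswith_eq] at h0 h1 h2 h3 h4 e5 e6 e7 e8
    simp [notification_email_subject_py, notification_email_subject_py_alt, pvFirstMatch, pvPrefixes, h0, h1, h2, h3, h4, e5, e6, e7, e8, L0, L1, L2, L3, L4, L5, L6, L7, L8]
  by_cases h5 : PySem.Str.startswith s "event.object." = true
  case pos =>
    have e6 : PySem.Str.startswith s "object." = false := sw_not s "event.object." "object." h5 (by decide) (by decide)
    have e7 : PySem.Str.startswith s "organisation.event." = false := sw_not s "event.object." "organisation.event." h5 (by decide) (by decide)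
    have e8 : PySem.Str.startswith s "event." = true := sw_of_sw s "event." "event.object." (by decide) h5
    simp [PySem.Str.startswith_eq] at h0 h1 h2 h3 h4 h5 e6 e7 e8
    simp [notification_email_subject_py, notification_email_subject_py_alt, pvFirstMatch, pvPrefixes, h0, h1, h2, h3, h4, h5, e6, e7, e8, L0, L1, L2, L3, L4, L5, L6, L7, L8]
  by_cases h6 : PySem.Str.startswith s "object." = true
  case pos =>
    have e7 : PySem.Str.startswith s "organisation.event." = false := sw_not s "object." "organisation.event." h6 (by decide) (by decide)
    have e8 : PySem.Str.startswith s "event." = false := sw_not s "object." "event." h6 (by decide) (by decide)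
    simp [PySem.Str.startswith_eq] at h0 h1 h2 h3 h4 h5 h6 e7 e8
    simp [notification_email_subject_py, notification_email_subject_py_alt, pvFirstMatch, pvPrefixes, h0, h1, h2, h3, h4, h5, h6, e7, e8, L0, L1, L2, L3, L4, L5, L6, L7, L8]
  by_cases h7 : PySem.Str.startswith s "organisation.event." = true
  case pos =>
    have e8 : PySem.Str.startswith s "event." = false := sw_not s "organisation.event." "event." h7 (by decide) (by decide)
    simp [PySem.Str.startswith_eq] at h0 h1 h2 h3 h4 h5 h6 h7 e8
    simp [notification_email_subject_py, notification_email_subject_py_alt, pvFirstMatch, pvPrefixes, h0, h1, h2, h3, h4, h5, h6, h7, e8, L0, L1, L2, L3, L4, L5, L6, L7, L8]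
  by_cases h8 : PySem.Str.startswith s "event." = true
  case pos =>
    simp [PySem.Str.startswith_eq] at h0 h1 h2 h3 h4 h5 h6 h7 h8
    simp [notification_email_subject_py, notification_email_subject_py_alt, pvFirstMatch, pvPrefixes, h0, h1, h2, h3, h4, h5, h6, h7, h8, L0, L1, L2, L3, L4, L5, L6, L7, L8]
  simp [PySem.Str.startswith_eq] at h0 h1 h2 h3 h4 h5 h6 h7 h8
  simp [notification_email_subject_py, notification_email_subject_py_alt, pvFirstMatch, pvPrefixes, h0, h1, h2, h3, h4, h5, h6, h7, h8, L0, L1, L2, L3, L4, L5, L6, L7, L8]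

-- ===== VERDICT (by name: the statement is the Claim_ definition above) =====
theorem notification_email_subject_py_spec : Claim_equal_notification_email_subject_py := by
  intro s _
  unfold Spec_notification_email_subject_py
  exact main_eq s
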